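-- pv_equiv track=rewrite | github.com/andrexmueller/advent_of_code_2015 | day_03.py | solve_part_02
-- ===== SOURCE A (Python) =====
-- move = {'>': (0, 1), '<': (0, -1), '^': (-1, 0), 'v': (1, 0)}
--
-- def solve_part_02(data):
--     santa = (0, 0)
--     robot = (0, 0)
--     visited = set([santa])
--
--     for i, direction in enumerate(data):
--         sr, sc = santa
--         rr, rc = robot
--         dr, dc = move[direction]
--         if i % 2:
--             santa = (sr+dr, sc+dc)
--             visited.add(santa)
--         else:
--             robot = (rr+dr, rc+dc)
--             visited.add(robot)
--
--     return len(visited)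
-- ===== SOURCE B (Python) =====
-- move = {'>': (0, 1), '<': (0, -1), '^': (-1, 0), 'v': (1, 0)}
--
-- def solve_part_02(data):
--     visited = {(0, 0)}
--     for seq in (data[0::2], data[1::2]):   # robot gets the even indices, santa the odd ones
--         r, c = 0, 0
--         for ch in seq:
--             dr, dc = move[ch]
--             r, c = r + dr, c + dc
--             visited.add((r, c))
--     return len(visited)
-- ===== Notes on version B (the rewrite author's own statement) =====
-- stated objective: alternative
-- what changed: Replaces the single interleaved loop with an index-parity branch and two mover accumulators by deinterleaving the input into data[0::2] (robot) and data[1::2] (santa) and walking each sequence in its own single-mover loop over a shared visited set.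
import Mathlib
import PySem

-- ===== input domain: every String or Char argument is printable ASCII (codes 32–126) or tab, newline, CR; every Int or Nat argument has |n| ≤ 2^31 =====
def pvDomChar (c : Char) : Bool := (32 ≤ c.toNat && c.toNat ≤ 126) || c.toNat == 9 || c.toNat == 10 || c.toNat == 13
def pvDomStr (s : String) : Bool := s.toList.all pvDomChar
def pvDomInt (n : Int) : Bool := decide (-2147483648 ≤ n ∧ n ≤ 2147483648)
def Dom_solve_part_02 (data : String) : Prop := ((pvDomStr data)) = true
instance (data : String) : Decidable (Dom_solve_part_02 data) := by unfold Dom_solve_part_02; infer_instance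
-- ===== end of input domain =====

-- B deinterleaves the input into the robot's moves (even indices) and santa's moves (odd indices)
-- and walks each path in its own single-mover loop over a shared set; objective: simpler decomposition.

-- ===== PORT A =====
-- the module-level dict  move = {'>': (0,1), '<': (0,-1), '^': (-1,0), 'v': (1,0)}
def pvMove : PySem.Dict Char (Int × Int) :=
  PySem.Dict.ofList [('>', (0, 1)), ('<', (0, -1)), ('^', (-1, 0)), ('v', (1, 0))]

-- one iteration of A's loop body; move[direction] is ported with getD (Pre_ excludes the KeyError inputs)
def pvStepA (st : ((Int × Int) × (Int × Int)) × PySem.Set (Int × Int)) (ic : Int × Char) :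
    ((Int × Int) × (Int × Int)) × PySem.Set (Int × Int) :=
  let santa := st.1.1
  let robot := st.1.2
  let visited := st.2
  let d := PySem.Dict.getD pvMove ic.2 (0, 0)
  if PySem.Int.mod ic.1 2 ≠ 0 then
    let s' := (santa.1 + d.1, santa.2 + d.2)
    ((s', robot), PySem.Set.add visited s')
  else
    let r' := (robot.1 + d.1, robot.2 + d.2)
    ((santa, r'), PySem.Set.add visited r')

def solve_part_02 (data : String) : Int :=
  let fin := (PySem.List.enumerate data.toList 0).foldl pvStepA
      ((((0 : Int), (0 : Int)), ((0 : Int), (0 : Int))), PySem.Set.ofList [((0 : Int), (0 : Int))])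
  (PySem.Set.len fin.2 : Int)

-- ===== PORT B =====
-- B's inner loop: walk one move sequence from (0,0), adding every visited position to the shared set
def pvWalk (seq : List Char) (visited : PySem.Set (Int × Int)) : PySem.Set (Int × Int) :=
  (seq.foldl (fun (st : (Int × Int) × PySem.Set (Int × Int)) ch =>
      let d := PySem.Dict.getD pvMove ch (0, 0)
      let p := (st.1.1 + d.1, st.1.2 + d.2)
      (p, PySem.Set.add st.2 p)) (((0 : Int), (0 : Int)), visited)).2

def solve_part_02_alt (data : String) : Int :=
  let robotSeq := (PySem.List.slice? data.toList (some 0) none 2).getD []   -- data[0::2]; step ≠ 0, never none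
  let santaSeq := (PySem.List.slice? data.toList (some 1) none 2).getD []   -- data[1::2]
  let v := pvWalk santaSeq (pvWalk robotSeq (PySem.Set.ofList [((0 : Int), (0 : Int))]))
  (PySem.Set.len v : Int)

-- ===== PRECONDITION & SPEC =====
-- Pre_ excludes exactly the strings containing a character other than > < ^ v, on which A raises KeyError.
def Pre_solve_part_02 (data : String) : Prop :=
  (data.toList.all (fun c => c == '>' || c == '<' || c == '^' || c == 'v')) = true
instance (data : String) : Decidable (Pre_solve_part_02 data) := by unfold Pre_solve_part_02; infer_instance
def pvWitness_solve_part_02 : String := "^v<>v"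

def Spec_solve_part_02 (data : String) (out : Int) : Prop := out = solve_part_02_alt data
instance (data : String) (out : Int) : Decidable (Spec_solve_part_02 data out) := by unfold Spec_solve_part_02; infer_instance

-- ===== CLAIM (what is proved, stated in full; the proofs are below) =====
def Claim_equal_solve_part_02 : Prop := ∀ (data : String), Dom_solve_part_02 data → Pre_solve_part_02 data → Spec_solve_part_02 data (solve_part_02 data)

-- ===== LEMMAS AND PROOFS =====

-- the displacement a direction character causes
def pvDelta (c : Char) : Int × Int := PySem.Dict.getD pvMove c (0, 0)

-- the successive positions of a walker starting at p and following cs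
def pvPath (p : Int × Int) : List Char → List (Int × Int)
  | [] => []
  | c :: cs => ((p.1 + (pvDelta c).1, p.2 + (pvDelta c).2)) :: pvPath ((p.1 + (pvDelta c).1, p.2 + (pvDelta c).2)) cs

-- the even-index elements of a list (what xs[0::2] selects); xs[1::2] is pvEvens xs.tail
def pvEvens {α : Type} : List α → List α
  | [] => []
  | [x] => [x]
  | x :: _ :: xs => x :: pvEvens xs

theorem pvEvens_cons {α : Type} (a : α) (l : List α) : pvEvens (a :: l) = a :: pvEvens l.tail := by
  cases l <;> rfl

theorem pvKey {α : Type} (xs : List α) (m : Nat) (h : xs.length ≤ 2 * m) :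
    List.filterMap (fun k : Nat => xs[2 * k]?) (List.range m) = pvEvens xs := by
  induction xs using pvEvens.induct generalizing m with
  | case1 => simp [pvEvens]
  | case2 x =>
    cases m with
    | zero => simp at h
    | succ m' =>
      rw [List.range_succ_eq_map, List.filterMap_cons, List.filterMap_map]
      simp [pvEvens, Nat.mul_succ]
  | case3 x y rest ih =>
    cases m with
    | zero => simp at h
    | succ m' =>
      rw [List.range_succ_eq_map, List.filterMap_cons, List.filterMap_map]
      have : ((fun k : Nat => (x :: y :: rest)[2 * k]?) ∘ Nat.succ) = fun k : Nat => rest[2 * k]? := by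
        funext k
        simp [Nat.mul_succ]
      rw [this, ih m' (by simp at h; omega)]
      simp [pvEvens]

theorem pvSlice_evens {α : Type} (xs : List α) :
    (PySem.List.slice? xs (some 0) none 2).getD [] = pvEvens xs := by
  simp only [PySem.List.slice?, PySem.List.sliceIndices]
  norm_num
  have h1 : (if 0 < xs.length then (((xs.length:Int) + 2 - 1) / 2).toNat else 0) = (xs.length + 1) / 2 := by
    split <;> omega
  have h2 : ∀ k : Nat, ((2 * (k:Int)).toNat) = 2 * k := by intro k; omega
  simp only [h1, h2]
  exact pvKey xs _ (by omega)

theorem pvSlice_odds {α : Type} (xs : List α) :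
    (PySem.List.slice? xs (some 1) none 2).getD [] = pvEvens xs.tail := by
  simp only [PySem.List.slice?, PySem.List.sliceIndices]
  cases xs with
  | nil => rfl
  | cons z t =>
    norm_num
    have h1 : (if 0 < t.length then (((t.length:Int) + 2 - 1) / 2).toNat else 0) = (t.length + 1) / 2 := by
      split <;> omega
    have h2 : ∀ k : Nat, (((1:Int) + 2 * (k:Int)).toNat) = 2 * k + 1 := by
      intro k; omega
    simp only [h1, h2]
    have h3 : (fun k : Nat => (z :: t)[2 * k + 1]?) = fun k : Nat => t[2 * k]? := by
      funext k; exact List.getElem?_cons_succ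
    rw [h3]
    exact pvKey t _ (by omega)

theorem pvWalk_mem (seq : List Char) (p : Int × Int) (v : PySem.Set (Int × Int)) (x : Int × Int) :
    (x ∈ (seq.foldl (fun (st : (Int × Int) × PySem.Set (Int × Int)) ch =>
      let d := PySem.Dict.getD pvMove ch (0, 0)
      let q := (st.1.1 + d.1, st.1.2 + d.2)
      (q, PySem.Set.add st.2 q)) (p, v)).2) ↔ x ∈ v ∨ x ∈ pvPath p seq := by
  induction seq generalizing p v with
  | nil => simp [pvPath]
  | cons c cs ih =>
    simp only [List.foldl_cons, pvPath, List.mem_cons]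
    rw [ih]
    simp [PySem.Set.mem_add, pvDelta]
    tauto

theorem pvWalk_nodup (seq : List Char) (p : Int × Int) (v : PySem.Set (Int × Int)) (hv : v.Nodup) :
    (seq.foldl (fun (st : (Int × Int) × PySem.Set (Int × Int)) ch =>
      let d := PySem.Dict.getD pvMove ch (0, 0)
      let q := (st.1.1 + d.1, st.1.2 + d.2)
      (q, PySem.Set.add st.2 q)) (p, v)).2.Nodup := by
  induction seq generalizing p v with
  | nil => exact hv
  | cons c cs ih => exact ih _ _ (PySem.Set.nodup_add _ _ hv)

theorem pvA_mem (l : List Char) (i : Int) (hi : PySem.Int.mod i 2 = 0)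
    (s r : Int × Int) (v : PySem.Set (Int × Int)) (x : Int × Int) :
    (x ∈ ((PySem.List.enumerate l i).foldl pvStepA ((s, r), v)).2) ↔
      x ∈ v ∨ x ∈ pvPath r (pvEvens l) ∨ x ∈ pvPath s (pvEvens l.tail) := by
  induction l using pvEvens.induct generalizing i s r v with
  | case1 => simp [PySem.List.enumerate_nil, pvEvens, pvPath]
  | case2 c =>
    rw [PySem.List.enumerate_cons, PySem.List.enumerate_nil]
    simp only [List.foldl_cons, List.foldl_nil, pvStepA]
    rw [PySem.Int.mod_eq_emod_of_pos (by norm_num)] at hi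
    simp [pvEvens, pvPath, pvDelta, PySem.Set.mem_add, hi]
  | case3 c c' rest ih =>
    rw [PySem.Int.mod_eq_emod_of_pos (by norm_num)] at hi
    have h1 : PySem.Int.mod (i + 1) 2 ≠ 0 := by
      rw [PySem.Int.mod_eq_emod_of_pos (by norm_num)]; omega
    have h2 : PySem.Int.mod (i + 1 + 1) 2 = 0 := by
      rw [PySem.Int.mod_eq_emod_of_pos (by norm_num)]; omega
    have h0 : PySem.Int.mod i 2 = 0 := by
      rw [PySem.Int.mod_eq_emod_of_pos (by norm_num)]; exact hi
    rw [PySem.List.enumerate_cons, PySem.List.enumerate_cons, List.foldl_cons, List.foldl_cons]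
    have e1 : pvStepA ((s, r), v) (i, c) =
        ((s, (r.1 + (pvDelta c).1, r.2 + (pvDelta c).2)),
          PySem.Set.add v (r.1 + (pvDelta c).1, r.2 + (pvDelta c).2)) := by
      simp [pvStepA, pvDelta, hi]
    rw [e1]
    have e2 : ∀ (s' r' : Int × Int) (v' : PySem.Set (Int × Int)),
        pvStepA ((s', r'), v') (i + 1, c') =
        (((s'.1 + (pvDelta c').1, s'.2 + (pvDelta c').2), r'),
          PySem.Set.add v' (s'.1 + (pvDelta c').1, s'.2 + (pvDelta c').2)) := by
      intro s' r' v'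
      simp [pvStepA, pvDelta, (show (i+1) % 2 = 1 by omega)]
    rw [e2]
    rw [ih (i + 1 + 1) h2]
    simp only [List.tail_cons, pvEvens_cons, pvPath, List.mem_cons, PySem.Set.mem_add]
    tauto

theorem pvA_nodup (l : List Char) (i : Int) (s r : Int × Int) (v : PySem.Set (Int × Int)) (hv : v.Nodup) :
    ((PySem.List.enumerate l i).foldl pvStepA ((s, r), v)).2.Nodup := by
  induction l generalizing i s r v with
  | nil => exact hv
  | cons c cs ih =>
    rw [PySem.List.enumerate_cons, List.foldl_cons]
    unfold pvStepA
    split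
    · exact ih _ _ _ _ (PySem.Set.nodup_add _ _ hv)
    · exact ih _ _ _ _ (PySem.Set.nodup_add _ _ hv)

-- ===== VERDICT (by name: the statement is the Claim_ definition above) =====
theorem solve_part_02_spec : Claim_equal_solve_part_02 := by
  intro data _ _
  unfold Spec_solve_part_02 solve_part_02 solve_part_02_alt
  rw [pvSlice_evens, pvSlice_odds]
  have hA := pvA_mem data.toList 0 (by decide) (0, 0) (0, 0) (PySem.Set.ofList [((0 : Int), (0 : Int))])
  have hB : ∀ x, x ∈ pvWalk (pvEvens data.toList.tail)
      (pvWalk (pvEvens data.toList) (PySem.Set.ofList [((0 : Int), (0 : Int))])) ↔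
      x ∈ PySem.Set.ofList [((0 : Int), (0 : Int))] ∨
        x ∈ pvPath (0, 0) (pvEvens data.toList) ∨ x ∈ pvPath (0, 0) (pvEvens data.toList.tail) := by
    intro x
    unfold pvWalk
    rw [pvWalk_mem, pvWalk_mem]
    tauto
  have hperm : ((PySem.List.enumerate data.toList 0).foldl pvStepA
      ((((0 : Int), (0 : Int)), ((0 : Int), (0 : Int))), PySem.Set.ofList [((0 : Int), (0 : Int))])).2.Perm
      (pvWalk (pvEvens data.toList.tail)
        (pvWalk (pvEvens data.toList) (PySem.Set.ofList [((0 : Int), (0 : Int))]))) := by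
    rw [List.perm_ext_iff_of_nodup]
    · intro x
      rw [hA, hB]
    · exact pvA_nodup _ _ _ _ _ (PySem.Set.nodup_ofList _)
    · unfold pvWalk
      exact pvWalk_nodup _ _ _ (pvWalk_nodup _ _ _ (PySem.Set.nodup_ofList _))
  simp only [PySem.Set.len]
  exact_mod_cast hperm.length_eq
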